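-- pv_equiv track=rewrite | github.com/HowardNTUST/twaea_crawler | Eason/lib/IR_U_request.py | get_last_choice
-- ===== SOURCE A (Python) =====
-- def get_last_choice(all_volunteers):
--     last_choice_yn = []
--     last_choice_temp=''
--     for i in range(len(all_volunteers)):
--         if all_volunteers[i][0] == 1:
--             last_choice_temp = all_volunteers[i][1]
--             last_choice_yn.append('Y')
--         else:
--             last_choice_yn.append('N')
--             continue
--
--     if last_choice_temp == '':
--         last_choice_temp = '沒有選擇學校'
--     last_choice = [last_choice_temp for i in range(len(all_volunteers))]
--
--     return last_choice,last_choice_yn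
-- ===== SOURCE B (Python) =====
-- def get_last_choice(all_volunteers):
--     last_choice_yn = ['Y' if v[0] == 1 else 'N' for v in all_volunteers]
--     last = ''
--     for v in reversed(all_volunteers):
--         if v[0] == 1:
--             last = v[1]
--             break
--     if last == '':
--         last = '沒有選擇學校'
--     return [last] * len(all_volunteers), last_choice_yn
-- ===== Notes on version B (the rewrite author's own statement) =====
-- stated objective: simpler
-- what changed: Replaces the single accumulating loop (appending flags and overwriting a temp) by a direct list comprehension for the Y/N flags plus a reverse scan that stops at the first (= last overall) chosen entry.
import Mathlib
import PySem

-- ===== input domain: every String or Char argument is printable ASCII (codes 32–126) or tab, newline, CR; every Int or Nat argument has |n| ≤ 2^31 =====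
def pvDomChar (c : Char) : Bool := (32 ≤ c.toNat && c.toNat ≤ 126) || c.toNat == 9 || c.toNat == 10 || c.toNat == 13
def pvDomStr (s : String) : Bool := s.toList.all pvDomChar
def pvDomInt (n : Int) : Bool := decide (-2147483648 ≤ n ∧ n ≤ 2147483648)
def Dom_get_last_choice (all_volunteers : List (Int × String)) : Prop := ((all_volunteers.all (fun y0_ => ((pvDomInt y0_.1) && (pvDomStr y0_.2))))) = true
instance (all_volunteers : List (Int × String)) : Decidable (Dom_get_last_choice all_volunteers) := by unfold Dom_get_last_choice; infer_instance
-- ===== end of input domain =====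

-- B builds the Y/N flags by a direct map and finds the last chosen school by a reverse scan; simpler decomposition, same values.
-- ===== PORT A =====
-- the for-loop over range(len(all_volunteers)) indexing all_volunteers[i] is ported as a fold over the list itself (indices always in range)
def get_last_choice (all_volunteers : List (Int × String)) : List String × List String :=
  let st := all_volunteers.foldl
    (fun (st : List String × String) v =>
      if v.1 = 1 then (st.1 ++ ["Y"], v.2) else (st.1 ++ ["N"], st.2))
    ([], "")
  let last_choice_temp := if st.2 = "" then "沒有選擇學校" else st.2
  (all_volunteers.map (fun _ => last_choice_temp), st.1)

-- ===== PORT B =====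
-- reverse scan with break: first match of the reversed list
def pvFindRev : List (Int × String) → String
  | [] => ""
  | v :: rest => if v.1 = 1 then v.2 else pvFindRev rest

def get_last_choice_alt (all_volunteers : List (Int × String)) : List String × List String :=
  let yn := all_volunteers.map (fun v => if v.1 = 1 then "Y" else "N")
  let last := pvFindRev all_volunteers.reverse
  let last := if last = "" then "沒有選擇學校" else last
  (List.replicate all_volunteers.length last, yn)

-- ===== PRECONDITION & SPEC =====
def Spec_get_last_choice (all_volunteers : List (Int × String)) (out : List String × List String) : Prop := out = get_last_choice_alt all_volunteers
instance (all_volunteers : List (Int × String)) (out : List String × List String) : Decidable (Spec_get_last_choice all_volunteers out) := by unfold Spec_get_last_choice; infer_instance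

-- ===== CLAIM (what is proved, stated in full; the proofs are below) =====
def Claim_equal_get_last_choice : Prop := ∀ (all_volunteers : List (Int × String)), Dom_get_last_choice all_volunteers → Spec_get_last_choice all_volunteers (get_last_choice all_volunteers)

-- ===== LEMMAS AND PROOFS =====
-- pvFindRev with an explicit start value (for relating to the fold's running temp)
def pvFindRevD (l : List (Int × String)) (s : String) : String :=
  match l with
  | [] => s
  | v :: rest => if v.1 = 1 then v.2 else pvFindRevD rest s

theorem pvFindRevD_append (l : List (Int × String)) (v : Int × String) (s : String) :
    pvFindRevD (l ++ [v]) s = pvFindRevD l (if v.1 = 1 then v.2 else s) := by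
  induction l with
  | nil => simp [pvFindRevD]
  | cons h t ih => simp [pvFindRevD, ih]

theorem pvFindRev_eq_D (l : List (Int × String)) : pvFindRev l = pvFindRevD l "" := by
  induction l with
  | nil => rfl
  | cons h t ih => simp [pvFindRev, pvFindRevD, ih]

theorem pv_foldl_eq (l : List (Int × String)) (acc : List String) (s : String) :
    l.foldl (fun (st : List String × String) v =>
        if v.1 = 1 then (st.1 ++ ["Y"], v.2) else (st.1 ++ ["N"], st.2)) (acc, s)
      = (acc ++ l.map (fun v => if v.1 = 1 then "Y" else "N"), pvFindRevD l.reverse s) := by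
  induction l generalizing acc s with
  | nil => simp [pvFindRevD]
  | cons h t ih =>
    simp only [List.foldl_cons, List.map_cons, List.reverse_cons]
    by_cases hc : h.1 = 1
    · simp [hc, ih, pvFindRevD_append]
    · simp [hc, ih, pvFindRevD_append]

-- ===== VERDICT (by name: the statement is the Claim_ definition above) =====
theorem get_last_choice_spec : Claim_equal_get_last_choice := by
  intro vs _
  unfold Spec_get_last_choice get_last_choice get_last_choice_alt
  simp only [pv_foldl_eq, pvFindRev_eq_D, List.nil_append]
  rw [List.map_const']
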